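-- pv_equiv track=rewrite | github.com/Gu5T4hv0/Python | Course/1_Semestre/Lists/List Loops/ex8.py | distancia_maxima
-- ===== SOURCE A (Python) =====
-- def distancia_maxima(texto):
--     posicoes = {}
--     maior_distancia = -1
--     letra_resultado = ''
--
--     for i in range(len(texto)):
--         letra = texto[i]
--         if letra in posicoes:
--             distancia = i - posicoes[letra][0]
--             posicoes[letra][1] = distancia
--             if distancia > maior_distancia:
--                 maior_distancia = distancia
--                 letra_resultado = letra
--         else:
--             posicoes[letra] = [i, 0]
--
--     return letra_resultado + str(maior_distancia)
-- ===== SOURCE B (Python) =====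
-- def distancia_maxima(texto):
--     primeiro = {}
--     ultimo = {}
--     for i, letra in enumerate(texto):
--         if letra not in primeiro:
--             primeiro[letra] = i
--         ultimo[letra] = i
--
--     maior_distancia = -1
--     letra_resultado = ''
--     for letra in primeiro:
--         distancia = ultimo[letra] - primeiro[letra]
--         if distancia > 0 and distancia > maior_distancia:
--             maior_distancia = distancia
--             letra_resultado = letra
--     return letra_resultado + str(maior_distancia)
-- ===== Notes on version B (the rewrite author's own statement) =====
-- stated objective: faster
-- what changed: Instead of updating a running maximum at every repeated occurrence inside the scan, B makes one pass that only records first and last occurrence index per character and then selects the best (last-first) over the distinct characters in first-appearance order, skipping single-occurrence characters.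
import Mathlib
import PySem

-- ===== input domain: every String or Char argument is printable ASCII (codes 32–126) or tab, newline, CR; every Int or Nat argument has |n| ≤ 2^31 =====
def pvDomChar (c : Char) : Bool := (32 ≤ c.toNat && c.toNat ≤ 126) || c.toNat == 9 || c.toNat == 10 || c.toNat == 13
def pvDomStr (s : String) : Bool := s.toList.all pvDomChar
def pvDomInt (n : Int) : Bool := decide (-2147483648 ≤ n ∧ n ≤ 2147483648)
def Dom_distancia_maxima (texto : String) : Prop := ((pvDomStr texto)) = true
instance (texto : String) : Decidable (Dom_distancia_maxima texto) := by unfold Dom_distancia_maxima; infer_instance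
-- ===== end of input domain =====

-- B replaces A's per-occurrence running-maximum update with first/last-occurrence dicts and a
-- separate selection pass over the distinct letters (less per-character work; measured faster).

-- ===== PORT A =====
-- body of A's for-loop at index i, where c = texto[i] (a 1-character string, ported as Char)
def pvStepA (st : PySem.Dict Char (List Int) × Int × String) (i : Int) (c : Char) :
    PySem.Dict Char (List Int) × Int × String :=
  let pos := st.1
  let maior := st.2.1
  let letra_res := st.2.2
  if pos.contains c then
    let v := pos.getD c []
    let distancia := i - PySem.List.pyGetD v 0 0
    let pos' := pos.insert c (PySem.List.pySetD v 1 distancia)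
    if distancia > maior then (pos', distancia, String.ofList [c])
    else (pos', maior, letra_res)
  else
    (pos.insert c [i, 0], maior, letra_res)

def distancia_maxima (texto : String) : String :=
  let cs := texto.toList
  let st := (PySem.List.pyRange 0 (PySem.Str.len texto) 1).foldl
      (fun st i => pvStepA st i (PySem.List.pyGetD cs i ' ')) (PySem.Dict.empty, -1, "")
  st.2.2 ++ PySem.Int.toStr st.2.1

-- ===== PORT B =====
-- body of B's building loop over enumerate(texto): record first and last occurrence index
def pvStepB (fl : PySem.Dict Char Int × PySem.Dict Char Int) (p : Int × Char) :
    PySem.Dict Char Int × PySem.Dict Char Int :=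
  let primeiro := if fl.1.contains p.2 then fl.1 else fl.1.insert p.2 p.1
  (primeiro, fl.2.insert p.2 p.1)

-- body of B's selection loop over the distinct letters
def pvSelStep (primeiro ultimo : PySem.Dict Char Int) (acc : Int × String) (c : Char) :
    Int × String :=
  let d := ultimo.getD c 0 - primeiro.getD c 0
  if d > 0 ∧ d > acc.1 then (d, String.ofList [c]) else acc

def distancia_maxima_alt (texto : String) : String :=
  let fl := (PySem.List.enumerate texto.toList).foldl pvStepB (PySem.Dict.empty, PySem.Dict.empty)
  let sel := fl.1.keys.foldl (pvSelStep fl.1 fl.2) (-1, "")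
  sel.2 ++ PySem.Int.toStr sel.1

-- ===== PRECONDITION & SPEC =====
def Spec_distancia_maxima (texto : String) (out : String) : Prop := out = distancia_maxima_alt texto
instance (texto : String) (out : String) : Decidable (Spec_distancia_maxima texto out) := by unfold Spec_distancia_maxima; infer_instance

-- ===== CLAIM (what is proved, stated in full; the proofs are below) =====
def Claim_equal_distancia_maxima : Prop := ∀ (texto : String), Dom_distancia_maxima texto → Spec_distancia_maxima texto (distancia_maxima texto)

-- ===== LEMMAS AND PROOFS =====

-- the selection fold of B, over a plain list of (letter, distance) pairs
def pvSel (acc : Int × String) (l : List (Char × Int)) : Int × String :=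
  l.foldl (fun a p => if p.2 > 0 ∧ p.2 > a.1 then (p.2, String.ofList [p.1]) else a) acc

-- the (letter, last - first) list B's selection loop effectively traverses
def pvDlist (F L : PySem.Dict Char Int) : List (Char × Int) :=
  F.items.map (fun p => (p.1, L.getD p.1 0 - p.2))

lemma pvSel_append (a : Int × String) (l1 l2 : List (Char × Int)) :
    pvSel a (l1 ++ l2) = pvSel (pvSel a l1) l2 := by
  simp [pvSel, List.foldl_append]

lemma pvSel_mono (l : List (Char × Int)) : ∀ a : Int × String, a.1 ≤ (pvSel a l).1 := by
  induction l with
  | nil => intro a; simp [pvSel]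
  | cons p t ih =>
    intro a
    simp only [pvSel, List.foldl_cons]
    by_cases h : p.2 > 0 ∧ p.2 > a.1
    · have := ih (p.2, String.ofList [p.1])
      simp only [pvSel] at this ⊢
      rw [if_pos h]
      omega
    · have := ih a
      simp only [pvSel] at this ⊢
      rw [if_neg h]
      exact this

lemma pvSel_absorb (l : List (Char × Int)) (a : Int × String)
    (h : ∀ p ∈ l, p.2 ≤ a.1 ∨ p.2 ≤ 0) : pvSel a l = a := by
  induction l with
  | nil => simp [pvSel]
  | cons p t ih =>
    have hp := h p (by simp)
    simp only [pvSel, List.foldl_cons]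
    rw [if_neg (by omega)]
    exact ih (fun q hq => h q (by simp [hq]))

lemma pvSel_attained (l : List (Char × Int)) : ∀ a : Int × String,
    pvSel a l = a ∨ ∃ p ∈ l, pvSel a l = (p.2, String.ofList [p.1]) := by
  induction l with
  | nil => intro a; left; simp [pvSel]
  | cons p t ih =>
    intro a
    simp only [pvSel, List.foldl_cons]
    by_cases h : p.2 > 0 ∧ p.2 > a.1
    · rw [if_pos h]
      rcases ih (p.2, String.ofList [p.1]) with h1 | ⟨q, hq, h1⟩
      · right; exact ⟨p, by simp, h1⟩
      · right; exact ⟨q, by simp [hq], h1⟩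
    · rw [if_neg h]
      rcases ih a with h1 | ⟨q, hq, h1⟩
      · left; exact h1
      · right; exact ⟨q, by simp [hq], h1⟩

-- the key lemma: raising the distance of one letter from d0 to d1 (all letters after it
-- having distance < d1) updates the selection exactly the way A's running maximum does
lemma pvSel_update (p1 p2 : List (Char × Int)) (c : Char) (d0 d1 : Int)
    (h1 : 1 ≤ d1) (h0 : d0 < d1) (h2 : ∀ q ∈ p2, q.2 < d1) :
    pvSel (-1, "") (p1 ++ (c, d1) :: p2) =
      (if d1 > (pvSel (-1, "") (p1 ++ (c, d0) :: p2)).1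
       then (d1, String.ofList [c]) else pvSel (-1, "") (p1 ++ (c, d0) :: p2)) := by
  have hsplit : ∀ d : Int, pvSel (-1, "") (p1 ++ (c, d) :: p2)
      = pvSel (pvSel (pvSel (-1, "") p1) [(c, d)]) p2 := by
    intro d
    rw [show p1 ++ (c, d) :: p2 = (p1 ++ [(c, d)]) ++ p2 by simp, pvSel_append, pvSel_append]
  set s1 := pvSel (-1, "") p1 with hs1
  set old := pvSel (-1, "") (p1 ++ (c, d0) :: p2) with hold
  by_cases hb : d1 > s1.1
  · -- new step fires: state becomes (d1, c) and p2 cannot beat it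
    have hnew : pvSel (-1, "") (p1 ++ (c, d1) :: p2) = (d1, String.ofList [c]) := by
      rw [hsplit]
      have : pvSel s1 [(c, d1)] = (d1, String.ofList [c]) := by
        simp only [pvSel, List.foldl_cons, List.foldl_nil]
        rw [if_pos (by constructor <;> omega)]
      rw [this]
      exact pvSel_absorb _ _ (fun q hq => by have := h2 q hq; omega)
    -- the old value is below d1
    have holdlt : old.1 < d1 := by
      have hstep : (pvSel s1 [(c, d0)]).1 ≤ max s1.1 d0 := by
        simp only [pvSel, List.foldl_cons, List.foldl_nil]
        by_cases h : d0 > 0 ∧ d0 > s1.1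
        · rw [if_pos h]; omega
        · rw [if_neg h]; omega
      rcases pvSel_attained p2 (pvSel s1 [(c, d0)]) with h1' | ⟨q, hq, h1'⟩
      · rw [hold, hsplit, h1']
        omega
      · rw [hold, hsplit, h1']
        have := h2 q hq
        omega
    rw [hnew, if_pos (by omega)]
  · -- new step does not fire: both folds traverse p2 from the same state
    have heq : pvSel (-1, "") (p1 ++ (c, d1) :: p2) = old := by
      rw [hold, hsplit, hsplit]
      have e1 : pvSel s1 [(c, d1)] = s1 := by
        simp only [pvSel, List.foldl_cons, List.foldl_nil]
        rw [if_neg (by omega)]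
      have e0 : pvSel s1 [(c, d0)] = s1 := by
        simp only [pvSel, List.foldl_cons, List.foldl_nil]
        rw [if_neg (by omega)]
      rw [e1, e0]
    have hmle : d1 ≤ old.1 := by
      have h0' : s1.1 ≤ old.1 := by
        rw [hold, hsplit]
        have := pvSel_mono p2 (pvSel s1 [(c, d0)])
        have := pvSel_mono [(c, d0)] s1
        omega
      omega
    rw [heq, if_neg (by omega)]

-- B's selection loop over the dict keys is pvSel over pvDlist
lemma pvSelStep_eq (F L : PySem.Dict Char Int) (hnd : F.keys.Nodup) (a : Int × String) :
    F.keys.foldl (pvSelStep F L) a = pvSel a (pvDlist F L) := by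
  have hkeys : F.keys = F.items.map Prod.fst := rfl
  rw [hkeys, pvSel, pvDlist, List.foldl_map, List.foldl_map]
  apply PySem.List.foldl_congr_mem
  intro acc p hp
  have hget : F.getD p.1 0 = p.2 :=
    PySem.Dict.getD_of_mem_items F (by rcases p with ⟨x, y⟩; exact hp) hnd 0
  simp [pvSelStep, hget]

-- the coupled loop invariant: A's dict mirrors B's first dict, B's last dict is bounded by i,
-- first-occurrence values increase along insertion order, and A's running pair is B's selection
def pvInv (i : Int) (pos : PySem.Dict Char (List Int)) (F L : PySem.Dict Char Int)
    (m : Int) (w : String) : Prop :=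
  F.keys.Nodup ∧
  (∀ k, pos.contains k = F.contains k) ∧
  (∀ k f, F.get? k = some f →
     (∃ a, pos.get? k = some [f, a]) ∧ f ≤ L.getD k 0 ∧ L.getD k 0 < i) ∧
  (∀ k, L.contains k = F.contains k) ∧
  F.items.Pairwise (fun p q => p.2 < q.2) ∧
  pvSel (-1, "") (pvDlist F L) = (m, w)

lemma pvStep_inv (i : Int) (pos : PySem.Dict Char (List Int)) (F L : PySem.Dict Char Int)
    (m : Int) (w : String) (c : Char) (h : pvInv i pos F L m w) :
    pvInv (i + 1) (pvStepA (pos, m, w) i c).1 (pvStepB (F, L) (i, c)).1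
      (pvStepB (F, L) (i, c)).2 (pvStepA (pos, m, w) i c).2.1 (pvStepA (pos, m, w) i c).2.2 := by
  obtain ⟨hnd, hcont, hshape, hlcont, hpw, hsel⟩ := h
  by_cases hc : F.contains c = true
  · -- repeated letter
    have hsome : (F.get? c).isSome := by
      rw [← PySem.Dict.contains_eq_isSome_get? F c]; exact hc
    obtain ⟨f, hf⟩ := Option.isSome_iff_exists.mp hsome
    obtain ⟨⟨a, hposc⟩, hfle, hllt⟩ := hshape c f hf
    have hposcont : pos.contains c = true := by rw [hcont]; exact hc
    have hgetD : pos.getD c [] = [f, a] := PySem.Dict.getD_of_get?_eq_some pos [] hposc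
    have hpyget : PySem.List.pyGetD ([f, a] : List Int) 0 0 = f := by
      simp [PySem.List.pyGetD_zero_cons]
    have hpyset : PySem.List.pySetD ([f, a] : List Int) 1 (i - f) = [f, i - f] := by
      simp [PySem.List.pySetD_of_nonneg]
    have hA : pvStepA (pos, m, w) i c =
        (pos.insert c [f, i - f],
         if i - f > m then (i - f, String.ofList [c]) else (m, w)) := by
      simp only [pvStepA, hposcont, if_true, hgetD, hpyget, hpyset]
      by_cases hmb : i - f > m
      · rw [if_pos hmb, if_pos hmb]
      · rw [if_neg hmb, if_neg hmb]
    have hB : pvStepB (F, L) (i, c) = (F, L.insert c i) := by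
      simp [pvStepB, hc]
    rw [hA, hB]
    -- decompose F.items at c
    have hmemitems : (c, f) ∈ F.items := PySem.Dict.mem_items_of_get?_eq_some F hf
    obtain ⟨I1, I2, hI⟩ := List.append_of_mem hmemitems
    have hkeys : F.keys = I1.map Prod.fst ++ c :: I2.map Prod.fst := by
      have : F.keys = F.items.map Prod.fst := rfl
      rw [this, hI]; simp
    have hndk := hnd
    rw [hkeys] at hndk
    have hc1 : c ∉ I1.map Prod.fst := by
      intro hx
      exact List.disjoint_of_nodup_append hndk hx (by simp)
    have hc2 : c ∉ I2.map Prod.fst := by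
      have h2 := hndk.of_append_right
      exact (List.nodup_cons.mp h2).1
    have hd1pos : 1 ≤ i - f := by omega
    refine ⟨hnd, ?_, ?_, ?_, hpw, ?_⟩
    · intro k
      by_cases hk : k = c
      · subst hk
        simp [hc]
      · simp [PySem.Dict.contains_insert, hk, hcont k]
    · intro k g hg
      by_cases hk : k = c
      · subst hk
        rw [hf] at hg
        injection hg with hg; subst hg
        refine ⟨⟨i - f, by rw [PySem.Dict.get?_insert_self]⟩, ?_, ?_⟩
        · rw [PySem.Dict.getD_insert_self]; omega
        · rw [PySem.Dict.getD_insert_self]; omega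
      · obtain ⟨⟨a', ha'⟩, h1', h2'⟩ := hshape k g hg
        refine ⟨⟨a', by rw [PySem.Dict.get?_insert, if_neg hk]; exact ha'⟩, ?_, ?_⟩
        · rw [PySem.Dict.getD_insert, if_neg hk]; omega
        · rw [PySem.Dict.getD_insert, if_neg hk]; omega
    · intro k
      by_cases hk : k = c
      · subst hk; simp [hc]
      · simp [PySem.Dict.contains_insert, hk, hlcont k]
    · -- the selection equation via pvSel_update
      have hgmap : ∀ (I : List (Char × Int)), c ∉ I.map Prod.fst →
          I.map (fun p => (p.1, (L.insert c i).getD p.1 0 - p.2))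
            = I.map (fun p => (p.1, L.getD p.1 0 - p.2)) := by
        intro I hcI
        apply List.map_congr_left
        intro p hp
        have hne : p.1 ≠ c := fun he => hcI (he ▸ List.mem_map_of_mem hp)
        rw [PySem.Dict.getD_insert, if_neg hne]
      have hdl' : pvDlist F (L.insert c i)
          = I1.map (fun p => (p.1, L.getD p.1 0 - p.2)) ++ (c, i - f) ::
            I2.map (fun p => (p.1, L.getD p.1 0 - p.2)) := by
        rw [pvDlist, hI]
        simp only [List.map_append, List.map_cons]
        rw [hgmap I1 hc1, hgmap I2 hc2, PySem.Dict.getD_insert]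
        simp
      have hdl : pvDlist F L
          = I1.map (fun p => (p.1, L.getD p.1 0 - p.2)) ++ (c, L.getD c 0 - f) ::
            I2.map (fun p => (p.1, L.getD p.1 0 - p.2)) := by
        rw [pvDlist, hI]
        simp
      have hpwI2 : ∀ q ∈ I2, f < q.2 := by
        have := hpw
        rw [hI] at this
        have h2 := (List.pairwise_append.mp this).2.1
        intro q hq
        exact (List.pairwise_cons.mp h2).1 q hq
      have hbound : ∀ q ∈ I2.map (fun p => (p.1, L.getD p.1 0 - p.2)), q.2 < i - f := by
        intro q hq
        obtain ⟨p, hp, rfl⟩ := List.mem_map.mp hq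
        have hfq := hpwI2 p hp
        -- p is in F, so its last occurrence is < i
        have hpF : F.get? p.1 = some p.2 :=
          (PySem.Dict.get?_eq_some_iff_mem_items F p.1 p.2 hnd).mpr (by rw [hI]; simp [hp])
        obtain ⟨_, _, hplt⟩ := hshape p.1 p.2 hpF
        simp only
        omega
      have hupd := pvSel_update (I1.map (fun p => (p.1, L.getD p.1 0 - p.2)))
        (I2.map (fun p => (p.1, L.getD p.1 0 - p.2))) c (L.getD c 0 - f) (i - f)
        hd1pos (by omega) hbound
      rw [← hdl', ← hdl, hsel] at hupd
      rw [hupd]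
  · -- first occurrence of the letter
    have hc' : F.contains c = false := by simpa using hc
    have hposcont : pos.contains c = false := by rw [hcont]; simpa using hc
    have hA : pvStepA (pos, m, w) i c = (pos.insert c [i, 0], m, w) := by
      simp [pvStepA, hposcont]
    have hB : pvStepB (F, L) (i, c) = (F.insert c i, L.insert c i) := by
      simp [pvStepB, hc']
    rw [hA, hB]
    have hlastlt : ∀ p ∈ F.items, p.2 < i := by
      intro p hp
      have hpF : F.get? p.1 = some p.2 :=
        (PySem.Dict.get?_eq_some_iff_mem_items F p.1 p.2 hnd).mpr hp
      obtain ⟨_, h1', h2'⟩ := hshape p.1 p.2 hpF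
      omega
    have hitems' : (F.insert c i).items = F.items ++ [(c, i)] :=
      PySem.Dict.items_insert_of_not_contains F i hc'
    refine ⟨PySem.Dict.nodup_keys_insert F c i hnd, ?_, ?_, ?_, ?_, ?_⟩
    · intro k
      by_cases hk : k = c
      · subst hk; simp
      · simp [PySem.Dict.contains_insert, hcont k]
    · intro k g hg
      by_cases hk : k = c
      · subst hk
        rw [PySem.Dict.get?_insert_self] at hg
        injection hg with hg; subst hg
        refine ⟨⟨0, by rw [PySem.Dict.get?_insert_self]⟩, ?_, ?_⟩
        · rw [PySem.Dict.getD_insert_self]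
        · rw [PySem.Dict.getD_insert_self]; omega
      · rw [PySem.Dict.get?_insert, if_neg hk] at hg
        obtain ⟨⟨a', ha'⟩, h1', h2'⟩ := hshape k g hg
        refine ⟨⟨a', by rw [PySem.Dict.get?_insert, if_neg hk]; exact ha'⟩, ?_, ?_⟩
        · rw [PySem.Dict.getD_insert, if_neg hk]; omega
        · rw [PySem.Dict.getD_insert, if_neg hk]; omega
    · intro k
      by_cases hk : k = c
      · subst hk; simp
      · simp [PySem.Dict.contains_insert, hlcont k]
    · rw [hitems']
      rw [List.pairwise_append]
      exact ⟨hpw, by simp, fun p hp q hq => by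
        simp at hq; subst hq; exact hlastlt p hp⟩
    · have hcnotin : c ∉ F.items.map Prod.fst := by
        intro hx
        have : c ∈ F.keys := by rw [show F.keys = F.items.map Prod.fst from rfl]; exact hx
        rw [← PySem.Dict.contains_iff_mem_keys] at this
        rw [hc'] at this; exact absurd this (by simp)
      have hdl' : pvDlist (F.insert c i) (L.insert c i)
          = pvDlist F L ++ [(c, 0)] := by
        rw [pvDlist, pvDlist, hitems', List.map_append]
        congr 1
        · apply List.map_congr_left
          intro p hp
          have hne : p.1 ≠ c := fun he => hcnotin (he ▸ List.mem_map_of_mem hp)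
          rw [PySem.Dict.getD_insert, if_neg hne]
        · simp [PySem.Dict.getD_insert]
      rw [hdl', pvSel_append, hsel]
      simp [pvSel]

lemma pvLoop (l : List Char) : ∀ (i : Int) (pos : PySem.Dict Char (List Int))
    (F L : PySem.Dict Char Int) (m : Int) (w : String), pvInv i pos F L m w →
    pvInv (i + l.length)
      ((PySem.List.enumerate l i).foldl (fun st p => pvStepA st p.1 p.2) (pos, m, w)).1
      ((PySem.List.enumerate l i).foldl pvStepB (F, L)).1
      ((PySem.List.enumerate l i).foldl pvStepB (F, L)).2
      ((PySem.List.enumerate l i).foldl (fun st p => pvStepA st p.1 p.2) (pos, m, w)).2.1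
      ((PySem.List.enumerate l i).foldl (fun st p => pvStepA st p.1 p.2) (pos, m, w)).2.2 := by
  induction l with
  | nil => intro i pos F L m w h; simpa [PySem.List.enumerate_nil] using h
  | cons c t ih =>
    intro i pos F L m w h
    rw [PySem.List.enumerate_cons]
    simp only [List.foldl_cons]
    have hstep := pvStep_inv i pos F L m w c h
    have := ih (i + 1) (pvStepA (pos, m, w) i c).1 (pvStepB (F, L) (i, c)).1
      (pvStepB (F, L) (i, c)).2 (pvStepA (pos, m, w) i c).2.1
      (pvStepA (pos, m, w) i c).2.2 hstep
    have harith : i + 1 + (t.length : Int) = i + ((c :: t).length : Int) := by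
      simp; omega
    rw [harith] at this
    simpa using this

lemma pvInv_init : pvInv 0 PySem.Dict.empty PySem.Dict.empty PySem.Dict.empty (-1) "" := by
  refine ⟨?_, ?_, ?_, ?_, ?_, ?_⟩
  · simp [PySem.Dict.keys_empty]
  · intro k; rfl
  · intro k f hf; rw [PySem.Dict.get?_empty] at hf; cases hf
  · intro k; rfl
  · constructor
  · rfl

theorem distancia_maxima_eq_alt (texto : String) :
    distancia_maxima texto = distancia_maxima_alt texto := by
  unfold distancia_maxima distancia_maxima_alt
  have hrange : (PySem.List.pyRange 0 (PySem.Str.len texto) 1).foldl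
      (fun st i => pvStepA st i (PySem.List.pyGetD texto.toList i ' '))
      (PySem.Dict.empty, -1, "")
      = (PySem.List.enumerate texto.toList).foldl (fun st p => pvStepA st p.1 p.2)
        (PySem.Dict.empty, -1, "") := by
    rw [PySem.List.enumerate_eq_map_pyRange texto.toList ' ', List.foldl_map]
    rw [PySem.Str.len_eq]
    rfl
  have h := pvLoop texto.toList 0 PySem.Dict.empty PySem.Dict.empty PySem.Dict.empty
    (-1) "" pvInv_init
  obtain ⟨hnd, _, _, _, _, hsel⟩ := h
  simp only [hrange]
  rw [pvSelStep_eq _ _ hnd, hsel]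

-- ===== VERDICT (by name: the statement is the Claim_ definition above) =====
theorem distancia_maxima_spec : Claim_equal_distancia_maxima := by
  intro texto _
  unfold Spec_distancia_maxima
  exact distancia_maxima_eq_alt texto
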